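-- pv_equiv track=rewrite | github.com/andgein/SIStema | src/web/modules/mail/views.py | cite_text
-- ===== SOURCE A (Python) =====
-- from string import whitespace
--
-- MAX_STRING_LENGTH = 70
--
-- def get_citation_depth(string):
--     """ Returns the citation depth of a sentence, i.e. 3 for ">>> Hello" and 2 for ">> Hello"  """
--     current = 0
--     while current < len(string) and string[current] == '>':
--         current += 1
--     return current
--
-- def ensure_beginning_whitespace(string):
--     """ Adds a beginning whitespace if necessary """
--     if string and string[0] != ' ':
--         return ' %s' % string
--     return string
--
-- def rstrip_if_not_space(line):
--     if not line.isspace():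
--         return line.rstrip()
--     return line
--
-- def cite_text(text):
--     """ Returns cited(quoted) text. Follows RFC 3676. """
--     lines = text.split('\n')
--     cited_lines = []
--     for line in lines:
--         depth = get_citation_depth(line)  # Gets the depth of the current citation
--         line = line[depth:]  # Deletes the old citation prefix
--         new_string_prefix = '>' * (depth + 1)  # Creates the new citation prefix
--         current_max_string_length = MAX_STRING_LENGTH - len(new_string_prefix)  # Max length for line without citation
--         line = rstrip_if_not_space(line)  # Strips unnecessary whitespaces if line is not a space
--         line = line.replace('\r', '')  # Removes all occurrences of '\r'
--         while len(line) > current_max_string_length: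
--             search_position = current_max_string_length
--             # Will try to find a whitespace where the line could be split
--             while search_position >= 0 and line[search_position] not in whitespace:
--                 search_position -= 1
--             if search_position != -1:  # If an appropriate place to insert a line-break was found
--                 result = line[:search_position]
--                 line = line[search_position + 1:]
--             else:
--                 # Will try to find the first whitespace where the line could be split when a word is too long
--                 search_position = current_max_string_length + 1
--                 while search_position < len(line) and line[search_position] not in whitespace:
--                     search_position += 1
--                 if search_position != len(line):  # If found
--                     result = line[:search_position]
--                     line = line[search_position + 1:]
--                 else:  # If an acceptable position was not found adds the whole line
--                     result = line
--                     line = ''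
--             # Add the resulting shortened line
--             cited_lines.append('%s%s' % (new_string_prefix, ensure_beginning_whitespace(result)))
--         # Add the remainder of the line (if it is not empty)
--         if line:
--             cited_lines.append('%s%s' % (new_string_prefix, ensure_beginning_whitespace(line)))
--
--     return '\n'.join(cited_lines)
-- ===== SOURCE B (Python) =====
-- from string import whitespace
--
-- MAX_STRING_LENGTH = 70
--
--
-- def _cited(prefix, chunk):
--     """Prefix a chunk with its citation marks, inserting a space unless one is already there."""
--     if chunk and chunk[0] != ' ':
--         return prefix + ' ' + chunk
--     return prefix + chunk
--
--
-- def cite_text(text):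
--     """ Returns cited(quoted) text. Follows RFC 3676.
--     Single pass per line: chunks are cut out of the fixed body with a moving
--     start index, so the remainder is never re-sliced. """
--     out = []
--     for line in text.split('\n'):
--         depth = 0
--         while depth < len(line) and line[depth] == '>':
--             depth += 1
--         prefix = '>' * (depth + 1)
--         limit = MAX_STRING_LENGTH - len(prefix)
--         body = line[depth:]
--         if not body.isspace():
--             body = body.rstrip()
--         body = body.replace('\r', '')
--         m = len(body)
--         start = 0
--         while m - start > limit:
--             cut = start + limit
--             while cut >= start and body[cut] not in whitespace:
--                 cut -= 1
--             if cut < start:  # no break point at or before the limit: take the next one (or the rest)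
--                 cut = start + limit + 1
--                 while cut < m and body[cut] not in whitespace:
--                     cut += 1
--             out.append(_cited(prefix, body[start:cut]))
--             start = cut + 1
--         if start < m:
--             out.append(_cited(prefix, body[start:m]))
--     return '\n'.join(out)
-- ===== Notes on version B (the rewrite author's own statement) =====
-- stated objective: alternative
-- what changed: B wraps each line in a single pass over the fixed body using a moving start index (each chunk is sliced out once at absolute positions), instead of A's repeated re-slicing of the shrinking remainder; intended to avoid the quadratic re-slicing, measured ~1.4x on random inputs (not >=1.5x, so not claimed as faster).
import Mathlib
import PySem

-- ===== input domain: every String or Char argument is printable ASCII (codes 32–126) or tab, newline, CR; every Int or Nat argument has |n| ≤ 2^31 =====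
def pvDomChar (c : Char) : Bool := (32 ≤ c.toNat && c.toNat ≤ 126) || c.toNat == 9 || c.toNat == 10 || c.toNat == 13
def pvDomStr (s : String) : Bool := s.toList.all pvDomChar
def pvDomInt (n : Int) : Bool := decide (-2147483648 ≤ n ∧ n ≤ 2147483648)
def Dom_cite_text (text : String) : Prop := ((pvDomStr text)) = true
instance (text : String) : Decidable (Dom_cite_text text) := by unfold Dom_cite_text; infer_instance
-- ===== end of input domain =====

-- B re-implements the RFC-3676 wrapper in a single pass per line: chunks are cut out of the
-- fixed body with a moving start index instead of re-slicing the shrinking remainder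
-- (objective: alternative; intended to avoid quadratic re-slicing, measured ~1.4x on random inputs, below the 1.5x 'faster' bar).

-- ===== PORT A =====

-- string.whitespace = ' \t\n\r\x0b\x0c' (membership test only, order irrelevant)
def aWSChars : List Char := [' ', '\t', '\n', '\r', '\x0b', '\x0c']

-- get_citation_depth: while current < len and s[current] == '>': current += 1
def aDepth : List Char → Nat
  | [] => 0
  | c :: cs => if c = '>' then aDepth cs + 1 else 0

-- ensure_beginning_whitespace
def aEnsure : List Char → List Char
  | [] => []
  | c :: cs => if c ≠ ' ' then ' ' :: c :: cs else c :: cs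

-- rstrip_if_not_space
def aRstripIfNotSpace (ln : List Char) : List Char :=
  if PySem.Chars.strIsspace ln then ln else PySem.Chars.rstrip ln

-- inner down-scan: while sp >= 0 and line[sp] not in whitespace: sp -= 1; return sp
-- (line[sp] is in range whenever the Python loop runs under Pre_; getD's default is then never read)
def aScanDown (ln : List Char) : Nat → Int
  | p => if aWSChars.contains (ln.getD p ' ') then (p : Int)
         else if p = 0 then -1 else aScanDown ln (p - 1)

-- inner up-scan: while sp < len(line) and line[sp] not in whitespace: sp += 1; return sp
def aScanUp (ln : List Char) (p : Nat) : Nat :=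
  if h : p < ln.length then
    (if aWSChars.contains (ln[p]) then p else aScanUp ln (p + 1))
  else p
termination_by ln.length - p

-- the while-loop of cite_text; fuel = len(line)+1 suffices under Pre_ (each pass shortens line)
def aChunks (limit : Int) : Nat → List Char → List (List Char)
  | 0, _ => []
  | fuel + 1, ln =>
    if (ln.length : Int) > limit then
      -- search_position starts at current_max_string_length (≥ 0 under Pre_; .toNat clamps only outside Pre_)
      let sp : Int := aScanDown ln limit.toNat
      if sp ≠ -1 then
        PySem.List.slice ln none (some sp) ::
          aChunks limit fuel (PySem.List.slice ln (some (sp + 1)) none)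
      else
        let sp2 : Nat := aScanUp ln (limit + 1).toNat
        if sp2 ≠ ln.length then
          PySem.List.slice ln none (some (sp2 : Int)) ::
            aChunks limit fuel (PySem.List.slice ln (some ((sp2 : Int) + 1)) none)
        else
          ln :: aChunks limit fuel []
    else if ln ≠ [] then [ln] else []   -- loop exit, then: if line: append

-- one iteration of the outer for-loop, producing the strings appended to cited_lines
def aLine (ln : List Char) : List (List Char) :=
  let depth := aDepth ln
  let pfx := List.replicate (depth + 1) '>'
  let limit : Int := 70 - ((depth : Int) + 1)
  let body0 := PySem.List.slice ln (some (depth : Int)) none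
  let body1 := aRstripIfNotSpace body0
  let body := PySem.Chars.replace body1 ['\r'] []
  (aChunks limit (body.length + 1) body).map (fun c => pfx ++ aEnsure c)

def cite_text (text : String) : String :=
  let lines := PySem.Chars.splitOn text.toList ['\n']
  let cited := lines.foldl (fun acc ln => acc ++ aLine ln) []
  String.ofList (PySem.Chars.join ['\n'] cited)

-- ===== PORT B =====

def bWSChars : List Char := [' ', '\t', '\n', '\r', '\x0b', '\x0c']

-- _cited
def bCited (pfx chunk : List Char) : List Char :=
  match chunk with
  | [] => pfx
  | c :: cs => if c ≠ ' ' then pfx ++ (' ' :: c :: cs) else pfx ++ (c :: cs)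

-- depth = 0; while depth < len(line) and line[depth] == '>': depth += 1
def bDepth (ln : List Char) (d : Nat) : Nat :=
  if h : d < ln.length then
    (if (ln[d]) = '>' then bDepth ln (d + 1) else d)
  else d
termination_by ln.length - d

-- cut = start+limit; while cut >= start and body[cut] not in whitespace: cut -= 1
-- (body[cut] in range whenever the loop runs under Pre_)
def bScanDown (body : List Char) (start : Nat) (p : Nat) : Int :=
  if bWSChars.contains (body.getD p ' ') then (p : Int)
  else if _h : p ≤ start then (start : Int) - 1
  else bScanDown body start (p - 1)
termination_by p

-- while cut < m and body[cut] not in whitespace: cut += 1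
def bScanUp (body : List Char) (p : Nat) : Nat :=
  if h : p < body.length then
    (if bWSChars.contains (body[p]) then p else bScanUp body (p + 1))
  else p
termination_by body.length - p

-- the while-loop over the moving start index (fuel = len(body)+1, enough under Pre_)
def bChunks (pfx : List Char) (limit : Int) (body : List Char) : Nat → Nat → List (List Char)
  | 0, _ => []
  | fuel + 1, start =>
    if (body.length : Int) - (start : Int) > limit then
      -- limit ≥ 0 under Pre_; .toNat clamps only outside Pre_
      let cutd : Int := bScanDown body start (start + limit.toNat)
      let cut : Nat := if cutd < (start : Int) then bScanUp body (start + limit.toNat + 1) else cutd.toNat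
      bCited pfx (PySem.List.slice body (some (start : Int)) (some (cut : Int))) ::
        bChunks pfx limit body fuel (cut + 1)
    else   -- loop exit, then: if start < m: append the remainder
      if start < body.length then [bCited pfx (PySem.List.slice body (some (start : Int)) none)] else []

-- _line_chunks
def bLine (ln : List Char) : List (List Char) :=
  let depth := bDepth ln 0
  let pfx := List.replicate (depth + 1) '>'
  let limit : Int := 70 - ((depth : Int) + 1)
  let body0 := PySem.List.slice ln (some (depth : Int)) none
  let body1 := if PySem.Chars.strIsspace body0 then body0 else PySem.Chars.rstrip body0
  let body := PySem.Chars.replace body1 ['\r'] []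
  bChunks pfx limit body (body.length + 1) 0

def cite_text_alt (text : String) : String :=
  String.ofList (PySem.Chars.join ['\n'] ((PySem.Chars.splitOn text.toList ['\n']).flatMap bLine))

-- ===== PRECONDITION & SPEC =====

-- Pre_ excludes texts with a line carrying 70 or more leading '>' marks: there the new prefix
-- exceeds MAX_STRING_LENGTH and A's inner while-loop never terminates (A returns no value).
def Pre_cite_text (text : String) : Prop :=
  ∀ l ∈ PySem.Chars.splitOn text.toList ['\n'], ¬ (List.replicate 70 '>' <+: l)
instance (text : String) : Decidable (Pre_cite_text text) := by unfold Pre_cite_text; infer_instance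

def pvWitness_cite_text : String := "a"

def Spec_cite_text (text : String) (out : String) : Prop := out = cite_text_alt text
instance (text : String) (out : String) : Decidable (Spec_cite_text text out) := by unfold Spec_cite_text; infer_instance

-- ===== CLAIM (what is proved, stated in full; the proofs are below) =====
def Claim_equal_cite_text : Prop :=
  ∀ (text : String), Dom_cite_text text → Pre_cite_text text → Spec_cite_text text (cite_text text)

-- ===== LEMMAS AND PROOFS =====

theorem ws_eq : bWSChars = aWSChars := rfl

theorem bCited_eq (pfx c : List Char) : bCited pfx c = pfx ++ aEnsure c := by
  cases c with
  | nil => simp [bCited, aEnsure]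
  | cons c cs => by_cases hc : c = ' ' <;> simp [bCited, aEnsure, hc]

theorem replicate_prefix_of_le_aDepth (n : Nat) (l : List Char) (h : n ≤ aDepth l) :
    List.replicate n '>' <+: l := by
  induction n generalizing l with
  | zero => simp
  | succ n ih =>
    cases l with
    | nil => simp [aDepth] at h
    | cons c cs =>
      by_cases hc : c = '>'
      · subst hc
        simp [aDepth] at h
        rw [List.replicate_succ]
        exact List.cons_prefix_cons.mpr ⟨rfl, ih cs (by omega)⟩
      · simp [aDepth, hc] at h

theorem bDepth_shift (l : List Char) (d : Nat) : bDepth l d = d + aDepth (l.drop d) := by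
  fun_induction bDepth l d with
  | case1 d h hgt ih =>
    rw [ih, List.drop_eq_getElem_cons h, hgt]
    simp [aDepth]; omega
  | case2 d h hgt =>
    rw [List.drop_eq_getElem_cons h]
    simp [aDepth, hgt]
  | case3 d h =>
    rw [List.drop_eq_nil_of_le (by omega)]
    simp [aDepth]

theorem getD_drop (body : List Char) (s p : Nat) (d : Char) :
    (body.drop s).getD p d = body.getD (s + p) d := by
  simp [List.getD_eq_getElem?_getD, List.getElem?_drop]

theorem aScanDown_bounds (ln : List Char) (p : Nat) :
    -1 ≤ aScanDown ln p ∧ aScanDown ln p ≤ (p : Int) := by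
  induction p with
  | zero =>
    rw [aScanDown]
    split_ifs with h1 h2
    · exact ⟨by omega, le_refl _⟩
    · exact ⟨le_refl _, by omega⟩
    · exact absurd rfl h2
  | succ q ih =>
    rw [aScanDown]
    split_ifs with h1 h2
    · exact ⟨by omega, le_refl _⟩
    · omega
    · simp only [Nat.add_sub_cancel]
      exact ⟨ih.1, by have := ih.2; omega⟩

theorem scanDown_shift (body : List Char) (s p : Nat) :
    bScanDown body s (s + p) = (s : Int) + aScanDown (body.drop s) p := by
  induction p with
  | zero =>
    rw [bScanDown, aScanDown, ws_eq, getD_drop]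
    split_ifs <;> omega
  | succ q ih =>
    rw [bScanDown, aScanDown, ws_eq, getD_drop]
    split_ifs with h1 h2 h3 <;> try omega
    all_goals try (exfalso; assumption)
    have e : s + (q + 1) - 1 = s + q := by omega
    rw [e, ih]
    simp only [Nat.add_sub_cancel]

theorem scanUp_shift_aux (n : Nat) : ∀ (body : List Char) (s : Nat), s ≤ body.length →
    ∀ p, body.length - (s + p) ≤ n → bScanUp body (s + p) = s + aScanUp (body.drop s) p := by
  induction n with
  | zero =>
    intro body s hs p hp
    rw [bScanUp, aScanUp]
    rw [dif_neg (by omega), dif_neg (by rw [List.length_drop]; omega)]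
  | succ n ih =>
    intro body s hs p hp
    rw [bScanUp, aScanUp]
    by_cases hlt : s + p < body.length
    · have hlt' : p < (body.drop s).length := by rw [List.length_drop]; omega
      rw [dif_pos hlt, dif_pos hlt']
      have hc : (body.drop s)[p] = body[s + p] := by
        rw [List.getElem_drop]
      rw [ws_eq, hc]
      by_cases hws : aWSChars.contains (body[s + p]'hlt) = true
      · rw [if_pos hws, if_pos hws]
      · rw [if_neg hws, if_neg hws]
        have := ih body s hs (p + 1) (by omega)
        rw [← Nat.add_assoc] at this
        exact this
    · rw [dif_neg hlt, dif_neg (by rw [List.length_drop]; omega)]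

theorem scanUp_shift (body : List Char) (s : Nat) (hs : s ≤ body.length) (p : Nat) :
    bScanUp body (s + p) = s + aScanUp (body.drop s) p :=
  scanUp_shift_aux (body.length - (s + p)) body s hs p (le_refl _)

theorem chunks_eq (limit : Int) (hl : 0 ≤ limit) (body pfx : List Char) :
    ∀ fuel start, bChunks pfx limit body fuel start
      = (aChunks limit fuel (body.drop start)).map (fun c => pfx ++ aEnsure c) := by
  intro fuel
  induction fuel with
  | zero => intro start; simp [bChunks, aChunks]
  | succ fuel ih =>
    intro start
    by_cases hs : start ≤ body.length
    case neg =>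
      have hd : body.drop start = [] := List.drop_eq_nil_of_le (by omega)
      rw [hd]
      simp only [bChunks, aChunks]
      rw [if_neg (show ¬((body.length : Int) - (start : Int) > limit) by omega),
          if_neg (show ¬(start < body.length) by omega),
          if_neg (show ¬(((([] : List Char).length) : Int) > limit) by simp; omega)]
      simp
    case pos =>
      have hlen : (body.drop start).length = body.length - start := List.length_drop
      by_cases hgt : (body.length : Int) - (start : Int) > limit
      case pos =>
        have hgt' : ((body.drop start).length : Int) > limit := by rw [hlen]; omega
        simp only [bChunks, aChunks]
        rw [if_pos hgt, if_pos hgt']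
        rw [scanDown_shift body start limit.toNat]
        obtain ⟨hge, hle⟩ := aScanDown_bounds (body.drop start) limit.toNat
        by_cases hneg : aScanDown (body.drop start) limit.toNat = -1
        case pos =>
          rw [hneg]
          rw [if_pos (show (start : Int) + -1 < (start : Int) by omega), if_neg (show ¬((-1 : Int) ≠ -1) by omega)]
          have ht1 : (limit + 1).toNat = limit.toNat + 1 := by omega
          have hsu : bScanUp body (start + limit.toNat + 1)
              = start + aScanUp (body.drop start) (limit.toNat + 1) := by
            rw [Nat.add_assoc]
            exact scanUp_shift body start hs (limit.toNat + 1)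
          rw [hsu, ht1]
          have hslice : PySem.List.slice body (some (start : Int))
              (some ((start + aScanUp (body.drop start) (limit.toNat + 1) : Nat) : Int))
              = (body.drop start).take (aScanUp (body.drop start) (limit.toNat + 1)) := by
            rw [PySem.List.slice_natCast]; congr 1; omega
          rw [hslice, bCited_eq, ih]
          by_cases heq : aScanUp (body.drop start) (limit.toNat + 1) = (body.drop start).length
          case pos =>
            rw [if_neg (not_not_intro heq)]
            have hdrop : body.drop (start + aScanUp (body.drop start) (limit.toNat + 1) + 1) = [] := by
              apply List.drop_eq_nil_of_le; omega
            rw [hdrop, heq, List.take_length, List.map_cons]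
          case neg =>
            rw [if_pos heq]
            have hcast : ((aScanUp (body.drop start) (limit.toNat + 1) : Int) + 1)
                = ((aScanUp (body.drop start) (limit.toNat + 1) + 1 : Nat) : Int) := by push_cast; ring
            rw [hcast, PySem.List.slice_to_natCast, PySem.List.slice_from_natCast]
            have hdd : body.drop (start + aScanUp (body.drop start) (limit.toNat + 1) + 1)
                = (body.drop start).drop (aScanUp (body.drop start) (limit.toNat + 1) + 1) := by
              rw [List.drop_drop]; congr 1
            rw [hdd, List.map_cons]
        case neg =>
          have hsp0 : 0 ≤ aScanDown (body.drop start) limit.toNat := by omega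
          rw [if_neg (by omega), if_pos hneg]
          have hcut : ((start : Int) + aScanDown (body.drop start) limit.toNat).toNat
              = start + (aScanDown (body.drop start) limit.toNat).toNat := by omega
          rw [hcut]
          have hslice : PySem.List.slice body (some (start : Int))
              (some ((start + (aScanDown (body.drop start) limit.toNat).toNat : Nat) : Int))
              = (body.drop start).take (aScanDown (body.drop start) limit.toNat).toNat := by
            rw [PySem.List.slice_natCast]; congr 1; omega
          rw [hslice, bCited_eq, ih]
          rw [PySem.List.slice_to _ hsp0, PySem.List.slice_from _ (by omega : (0:Int) ≤ aScanDown (body.drop start) limit.toNat + 1)]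
          have ht : (aScanDown (body.drop start) limit.toNat + 1).toNat
              = (aScanDown (body.drop start) limit.toNat).toNat + 1 := by omega
          rw [ht]
          have hdd : body.drop (start + (aScanDown (body.drop start) limit.toNat).toNat + 1)
              = (body.drop start).drop ((aScanDown (body.drop start) limit.toNat).toNat + 1) := by
            rw [List.drop_drop]; congr 1
          rw [hdd, List.map_cons]
      case neg =>
        simp only [bChunks, aChunks]
        rw [if_neg hgt]
        rw [if_neg (show ¬(((body.drop start).length : Int) > limit) by rw [hlen]; omega)]
        by_cases hlt : start < body.length
        case pos =>
          rw [if_pos hlt, if_pos (show body.drop start ≠ [] from by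
            intro hnil
            have := congrArg List.length hnil
            rw [hlen] at this
            simp at this
            omega)]
          rw [PySem.List.slice_from_natCast, bCited_eq, List.map_singleton]
        case neg =>
          rw [if_neg hlt, if_neg (show ¬ body.drop start ≠ [] from
            not_not_intro (List.drop_eq_nil_of_le (by omega)))]
          simp

theorem line_eq (ln : List Char) (h : ¬ (List.replicate 70 '>' <+: ln)) :
    bLine ln = aLine ln := by
  have hd : aDepth ln ≤ 69 := by
    by_contra hcon
    exact h (replicate_prefix_of_le_aDepth 70 ln (by omega))
  have hl0 : (0 : Int) ≤ 70 - ((aDepth ln : Int) + 1) := by omega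
  simp only [bLine, aLine, aRstripIfNotSpace, bDepth_shift, List.drop_zero, Nat.zero_add]
  rw [chunks_eq _ hl0, List.drop_zero]

-- ===== VERDICT (by name: the statement is the Claim_ definition above) =====
theorem cite_text_spec : Claim_equal_cite_text := by
  intro text _hdom hpre
  unfold Spec_cite_text cite_text cite_text_alt
  simp only []
  congr 1
  rw [PySem.List.foldl_append_eq_flatMap aLine (PySem.Chars.splitOn text.toList ['\n']) []]
  rw [List.nil_append]
  congr 1
  exact (List.flatMap_congr (fun l hl => line_eq l (hpre l hl))).symm
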